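-- pv_equiv track=rewrite | github.com/ringedSquid/Stuy_CCC_Potd | PClassic2021Novice/MysteriousCall.py | reversedMessage
-- ===== SOURCE A (Python) =====
-- def reversedMessage(message, k):
--     new_message = ""
--     sub = 0
--     for x in range(len(message)):
--         if x >= len(message)-k:
--             new_message += message[(len(message)-1)-sub]
--             sub += 1
--         else:
--             new_message += message[x]
--
--
--     return new_message
-- ===== SOURCE B (Python) =====
-- def reversedMessage(message, k):
--     split = max(0, len(message) - k)
--     return message[:split] + message[split:][::-1]
-- ===== Notes on version B (the rewrite author's own statement) =====
-- stated objective: simpler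
-- what changed: Replaced A's character-by-character loop (with its index/counter bookkeeping) by a closed-form split: message[:split] + message[split:][::-1] with split = max(0, len(message) - k).
import Mathlib
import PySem

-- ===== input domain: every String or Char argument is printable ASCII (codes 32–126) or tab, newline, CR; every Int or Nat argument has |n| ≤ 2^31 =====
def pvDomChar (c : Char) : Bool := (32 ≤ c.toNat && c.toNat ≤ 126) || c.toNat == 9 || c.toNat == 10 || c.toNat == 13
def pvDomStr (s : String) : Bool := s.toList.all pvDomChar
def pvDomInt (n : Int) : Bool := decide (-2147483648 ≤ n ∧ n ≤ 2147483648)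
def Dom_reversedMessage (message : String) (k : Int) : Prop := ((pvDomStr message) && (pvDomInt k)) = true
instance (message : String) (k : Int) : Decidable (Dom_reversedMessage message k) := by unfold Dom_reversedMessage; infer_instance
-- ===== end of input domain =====

-- B replaces A's per-character loop by a closed-form slice split (simpler); A and B agree on all inputs.

-- ===== PORT A =====
-- Literal port of A's loop: fold over range(len(message)) carrying (new_message, sub).
-- The indices A uses are always in range, so pyGetD's default ' ' is never consulted.
def reversedMessage (message : String) (k : Int) : String :=
  let cs := message.toList
  let n : Int := (cs.length : Int)
  let st := (PySem.List.pyRange 0 n 1).foldl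
    (fun (st : List Char × Int) x =>
      if n - k ≤ x then
        (st.1 ++ [PySem.List.pyGetD cs (n - 1 - st.2) ' '], st.2 + 1)
      else
        (st.1 ++ [PySem.List.pyGetD cs x ' '], st.2))
    ([], 0)
  String.ofList st.1

-- ===== PORT B =====
-- Port of Source B: split = max(0, len - k); message[:split] ++ reverse(message[split:])
-- ([::-1] is list reversal, cf. PySem.List.slice?_none_none_neg_one).
def reversedMessage_alt (message : String) (k : Int) : String :=
  let cs := message.toList
  let split : Int := max 0 ((cs.length : Int) - k)
  String.ofList (PySem.List.slice cs none (some split) ++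
             (PySem.List.slice cs (some split) none).reverse)

-- ===== PRECONDITION & SPEC =====
def Spec_reversedMessage (message : String) (k : Int) (out : String) : Prop := out = reversedMessage_alt message k
instance (message : String) (k : Int) (out : String) : Decidable (Spec_reversedMessage message k out) := by unfold Spec_reversedMessage; infer_instance

-- ===== CLAIM (what is proved, stated in full; the proofs are below) =====
def Claim_equal_reversedMessage : Prop := ∀ (message : String) (k : Int), Dom_reversedMessage message k → Spec_reversedMessage message k (reversedMessage message k)

-- ===== LEMMAS AND PROOFS =====

-- The final string both programs build, expressed over the character list with the
-- clamped split point s = min (max 0 (n-k)).toNat cs.length.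
def pvFinal (cs : List Char) (s : Nat) : List Char := cs.take s ++ (cs.drop s).reverse

lemma pvFinal_length (cs : List Char) (s : Nat) (hs : s ≤ cs.length) :
    (pvFinal cs s).length = cs.length := by
  simp [pvFinal]; omega

lemma pvFinal_get_lt (cs : List Char) (s m : Nat) (hs : s ≤ cs.length) (hm : m < s) :
    (pvFinal cs s)[m]'(by rw [pvFinal_length cs s hs]; omega) = cs[m]'(by omega) := by
  have h1 : m < (cs.take s).length := by simp; omega
  simp only [pvFinal]
  rw [List.getElem_append_left h1, List.getElem_take]

lemma pvFinal_get_ge (cs : List Char) (s m : Nat) (hs : s ≤ cs.length)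
    (hm1 : s ≤ m) (hm2 : m < cs.length) :
    (pvFinal cs s)[m]'(by rw [pvFinal_length cs s hs]; omega)
      = cs[cs.length - 1 - (m - s)]'(by omega) := by
  have hlt : (cs.take s).length ≤ m := by simp; omega
  simp only [pvFinal]
  rw [List.getElem_append_right hlt]
  have htl : (cs.take s).length = s := by simp; omega
  simp only [htl]
  rw [List.getElem_reverse, List.getElem_drop]
  congr 1
  simp
  omega

-- Loop invariant for A's fold: after m iterations the state is
-- (first m characters of the final string, number of indices ≥ split seen so far).
lemma pv_loop_inv (cs : List Char) (k : Int) (s : Nat)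
    (hsdef : s = min (max 0 ((cs.length : Int) - k)).toNat cs.length)
    (m : Nat) (hm : m ≤ cs.length) :
    (PySem.List.pyRange 0 (m : Int) 1).foldl
      (fun (st : List Char × Int) x =>
        if (cs.length : Int) - k ≤ x then
          (st.1 ++ [PySem.List.pyGetD cs ((cs.length : Int) - 1 - st.2) ' '], st.2 + 1)
        else
          (st.1 ++ [PySem.List.pyGetD cs x ' '], st.2))
      ([], 0)
      = ((pvFinal cs s).take m, ((m - s : Nat) : Int)) := by
  have hs : s ≤ cs.length := by omega
  induction m with
  | zero => simp [PySem.List.pyRange_one_eq_nil]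
  | succ m ih =>
    have hm' : m ≤ cs.length := by omega
    have hrng : PySem.List.pyRange 0 ((m : Int) + 1) 1
        = PySem.List.pyRange 0 (m : Int) 1 ++ [(m : Int)] :=
      PySem.List.pyRange_one_succ_right (by positivity)
    have hmlen : m < cs.length := by omega
    have hFlen : m < (pvFinal cs s).length := by rw [pvFinal_length cs s hs]; omega
    have htake : (pvFinal cs s).take (m + 1)
        = (pvFinal cs s).take m ++ [(pvFinal cs s)[m]'hFlen] := by
      rw [List.take_add_one, List.getElem?_eq_getElem hFlen]; rfl
    push_cast
    rw [hrng, List.foldl_append, ih hm', List.foldl_cons, List.foldl_nil]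
    by_cases hc : (cs.length : Int) - k ≤ (m : Int)
    · -- reversed region: m ≥ s
      have hms : s ≤ m := by omega
      rw [if_pos hc]
      have hidx : (cs.length : Int) - 1 - ((m - s : Nat) : Int)
          = ((cs.length - 1 - (m - s) : Nat) : Int) := by omega
      have hget : PySem.List.pyGetD cs ((cs.length : Int) - 1 - ((m - s : Nat) : Int)) ' '
          = cs[cs.length - 1 - (m - s)]'(by omega) := by
        rw [hidx, PySem.List.pyGetD_natCast, List.getD_eq_getElem]
      simp only [Prod.mk.injEq]
      refine ⟨?_, ?_⟩
      · rw [htake, hget, pvFinal_get_ge cs s m hs hms hmlen]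
      · omega
    · -- unchanged prefix: m < s
      have hms : m < s := by omega
      rw [if_neg hc]
      have hget : PySem.List.pyGetD cs ((m : Nat) : Int) ' ' = cs[m]'hmlen := by
        rw [PySem.List.pyGetD_natCast, List.getD_eq_getElem]
      simp only [Prod.mk.injEq]
      refine ⟨?_, ?_⟩
      · rw [htake, hget, pvFinal_get_lt cs s m hs hms]
      · omega

-- ===== VERDICT (by name: the statement is the Claim_ definition above) =====
theorem reversedMessage_spec : Claim_equal_reversedMessage := by
  intro message k _
  unfold Spec_reversedMessage reversedMessage reversedMessage_alt
  set cs := message.toList with hcs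
  set s : Nat := min (max 0 ((cs.length : Int) - k)).toNat cs.length with hsdef
  have hs : s ≤ cs.length := by omega
  have hsplit : (0 : Int) ≤ max 0 ((cs.length : Int) - k) := le_max_left _ _
  have hinv := pv_loop_inv cs k s hsdef cs.length le_rfl
  simp only [hinv]
  rw [List.take_of_length_le (by rw [pvFinal_length cs s hs])]
  have h1 := PySem.List.slice_to (xs := cs) hsplit
  have h2 := PySem.List.slice_from (xs := cs) hsplit
  rw [h1, h2]
  have hts : (max 0 ((cs.length : Int) - k)).toNat = s ∨
      ((max 0 ((cs.length : Int) - k)).toNat ≥ cs.length ∧ s = cs.length) := by omega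
  unfold pvFinal
  rcases hts with h | ⟨h1, h2⟩
  · rw [h]
  · have hA : List.take ((max 0 ((cs.length : Int) - k)).toNat) cs = cs :=
      List.take_of_length_le (by omega)
    have hB : List.drop ((max 0 ((cs.length : Int) - k)).toNat) cs = [] :=
      List.drop_of_length_le (by omega)
    rw [h2, hA, hB, List.drop_length, List.take_length]
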